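-- pv_equiv track=rewrite | github.com/shaharby7/Jcalc | Backend/general_utils.py | reduce_repetitive_siteswaps
-- ===== SOURCE A (Python) =====
-- import functools
--
-- def reduce_repetitive_siteswaps(siteswap):
--     len_siteswap = len(siteswap)
--     for chunk_size in range(len_siteswap):
--         chunk_size += 1
--         chunks = [siteswap[i:i + chunk_size] for i in range(0, len_siteswap, chunk_size)]
--         is_repetitive_chunks = functools.reduce(lambda a, b: a == b, chunks)
--         if is_repetitive_chunks:
--             return chunks[0]
--     return siteswap
-- ===== SOURCE B (Python) =====
-- def reduce_repetitive_siteswaps(siteswap):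
--     half = len(siteswap) // 2
--     if len(siteswap) % 2 == 0 and siteswap[:half] == siteswap[half:]:
--         return siteswap[:half]
--     return siteswap
-- ===== Notes on version B (the rewrite author's own statement) =====
-- stated objective: faster
-- what changed: A loops over every chunk size building all chunks and folding '==' over them (where the fold is truthy only for one whole chunk or two equal halves); B replaces the whole loop by the single check 'even length and first half == second half'.
import Mathlib
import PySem

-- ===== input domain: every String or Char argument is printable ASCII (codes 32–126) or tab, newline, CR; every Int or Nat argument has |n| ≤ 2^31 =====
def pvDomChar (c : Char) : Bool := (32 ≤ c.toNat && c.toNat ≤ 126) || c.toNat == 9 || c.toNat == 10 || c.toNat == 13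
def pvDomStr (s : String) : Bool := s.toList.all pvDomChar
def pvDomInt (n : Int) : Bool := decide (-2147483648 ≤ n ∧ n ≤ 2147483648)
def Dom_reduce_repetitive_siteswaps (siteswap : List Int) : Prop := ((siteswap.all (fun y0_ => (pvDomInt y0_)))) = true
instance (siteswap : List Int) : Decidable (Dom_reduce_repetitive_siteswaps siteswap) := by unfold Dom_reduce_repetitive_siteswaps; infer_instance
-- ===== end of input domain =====

-- B replaces A's loop over all chunk sizes by the single check "even length and first half
-- equals second half" (the only way A's '==' fold over the chunks can be truthy before the
-- whole-list chunk is reached); measured asymptotically faster (O(n) vs O(n^2)).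

-- ===== PORT A =====
-- A's `functools.reduce(lambda a, b: a == b, chunks)` folds `==` over Python lists, producing a
-- list (one chunk) or a bool (two or more chunks; a bool compared to a list is False).
inductive PvVal
  | ofList : List Int → PvVal
  | ofBool : Bool → PvVal
deriving DecidableEq, Repr

-- lambda a, b: a == b  (a is the running value, b is always a chunk, i.e. a list)
def pvEqStep (a : PvVal) (b : List Int) : PvVal :=
  match a with
  | .ofList l => .ofBool (decide (l = b))
  | .ofBool _ => .ofBool false      -- in Python, bool == list is False

-- Python truthiness of the reduce result
def pvTruthy : PvVal → Bool
  | .ofList l => !l.isEmpty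
  | .ofBool b => b

-- functools.reduce(lambda a, b: a == b, chunks); none = the TypeError on an empty iterable
-- (never reached: inside A's loop `chunks` is nonempty)
def pvReduceEq : List (List Int) → Option PvVal
  | [] => none
  | c :: rest => some (rest.foldl pvEqStep (.ofList c))

-- [siteswap[i:i + chunk_size] for i in range(0, len_siteswap, chunk_size)]
def pvChunks (s : List Int) (n k : Int) : List (List Int) :=
  (PySem.List.pyRange 0 n k).map (fun i => PySem.List.slice s (some i) (some (i + k)))

-- one iteration of A's for-loop (acc = some r models an already executed `return r`)
def pvBody (s : List Int) (n : Int) (acc : Option (List Int)) (cs0 : Int) : Option (List Int) :=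
  match acc with
  | some r => some r
  | none =>
    let chunk_size := cs0 + 1
    let chunks := pvChunks s n chunk_size
    match pvReduceEq chunks with
    | none => none                  -- unreachable: chunks is nonempty inside the loop
    | some v =>
      if pvTruthy v then PySem.List.pyGet? chunks 0   -- return chunks[0]
      else none

def reduce_repetitive_siteswaps (siteswap : List Int) : List Int :=
  let len_siteswap : Int := siteswap.length
  (((PySem.List.pyRange 0 len_siteswap 1).foldl (pvBody siteswap len_siteswap) none).getD siteswap)

-- ===== PORT B =====
def reduce_repetitive_siteswaps_alt (siteswap : List Int) : List Int :=
  let n : Int := siteswap.length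
  let half := PySem.Int.floordiv n 2
  if PySem.Int.mod n 2 = 0 ∧
      PySem.List.slice siteswap none (some half) = PySem.List.slice siteswap (some half) none
  then PySem.List.slice siteswap none (some half)
  else siteswap

-- ===== PRECONDITION & SPEC =====
def Spec_reduce_repetitive_siteswaps (siteswap : List Int) (out : List Int) : Prop := out = reduce_repetitive_siteswaps_alt siteswap
instance (siteswap : List Int) (out : List Int) : Decidable (Spec_reduce_repetitive_siteswaps siteswap out) := by unfold Spec_reduce_repetitive_siteswaps; infer_instance

-- ===== CLAIM (what is proved, stated in full; the proofs are below) =====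
def Claim_equal_reduce_repetitive_siteswaps : Prop := ∀ (siteswap : List Int), Dom_reduce_repetitive_siteswaps siteswap → Spec_reduce_repetitive_siteswaps siteswap (reduce_repetitive_siteswaps siteswap)

-- ===== LEMMAS AND PROOFS =====

-- B in take/drop form
theorem alt_eq (s : List Int) :
    reduce_repetitive_siteswaps_alt s =
      if s.length % 2 = 0 ∧ s.take (s.length / 2) = s.drop (s.length / 2)
      then s.take (s.length / 2) else s := by
  have h2 : (0:Int) < 2 := by omega
  show (if PySem.Int.mod ((s.length : Int)) 2 = 0 ∧
        PySem.List.slice s none (some (PySem.Int.floordiv ((s.length : Int)) 2)) =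
          PySem.List.slice s (some (PySem.Int.floordiv ((s.length : Int)) 2)) none
      then PySem.List.slice s none (some (PySem.Int.floordiv ((s.length : Int)) 2)) else s) = _
  rw [PySem.Int.floordiv_eq_ediv_of_pos h2, PySem.Int.mod_eq_emod_of_pos h2]
  rw [PySem.List.slice_to s (by omega : (0:Int) ≤ (s.length : Int) / 2),
      PySem.List.slice_from s (by omega : (0:Int) ≤ (s.length : Int) / 2)]
  rw [show ((s.length : Int) / 2).toNat = s.length / 2 by omega]
  by_cases hp : s.length % 2 = 0 ∧ s.take (s.length / 2) = s.drop (s.length / 2)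
  · rw [if_pos ⟨by omega, hp.2⟩, if_pos hp]
  · rw [if_neg (fun hc => hp ⟨by omega, hc.2⟩), if_neg hp]

-- a positive-step pyRange unfolds one element at a time
theorem pyRange_pos_cons (a b k : Int) (hk : 0 < k) (hab : a < b) :
    PySem.List.pyRange a b k = a :: PySem.List.pyRange (a + k) b k := by
  rw [PySem.List.pyRange_of_pos a b hk, PySem.List.pyRange_of_pos (a + k) b hk, if_pos hab]
  have hcount : ((b - a + k - 1) / k).toNat = ((b - a - 1) / k).toNat + 1 := by
    have h1 : b - a + k - 1 = (b - a - 1) + 1 * k := by ring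
    have hq0 : 0 ≤ (b - a - 1) / k := Int.ediv_nonneg (by omega) (by omega)
    rw [h1, Int.add_mul_ediv_right _ _ (by omega : k ≠ 0)]; omega
  rw [hcount, List.range_succ_eq_map]
  simp only [List.map_cons, List.map_map, Nat.cast_zero, mul_zero, add_zero]
  congr 1
  by_cases h2 : a + k < b
  · rw [if_pos h2, show b - (a + k) + k - 1 = b - a - 1 by ring]
    apply List.map_congr_left
    intro x _
    simp only [Function.comp, Nat.succ_eq_add_one]
    push_cast; ring
  · rw [if_neg h2]
    have hz : (b - a - 1) / k = 0 := Int.ediv_eq_zero_of_lt (by omega) (by omega)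
    simp [hz]

-- pvEqStep collapses to False once the accumulator is a bool
theorem foldl_pvEqStep_false (l : List (List Int)) :
    l.foldl pvEqStep (.ofBool false) = .ofBool false := by
  induction l with
  | nil => rfl
  | cons x xs ih => simpa [pvEqStep] using ih

-- the fold with early return keeps an already returned value
theorem foldl_pvBody_some (s : List Int) (n : Int) (l : List Int) (r : List Int) :
    l.foldl (pvBody s n) (some r) = some r := by
  induction l with
  | nil => rfl
  | cons x xs ih => simpa [pvBody] using ih

-- the fold with early return is findSome?
theorem foldl_pvBody_eq_findSome (s : List Int) (n : Int) (l : List Int) :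
    l.foldl (pvBody s n) none = l.findSome? (fun cs0 => pvBody s n none cs0) := by
  induction l with
  | nil => rfl
  | cons x xs ih =>
    simp only [List.foldl_cons, List.findSome?_cons]
    cases h : pvBody s n none x with
    | some r => rw [foldl_pvBody_some]
    | none => exact ih

-- the value of one loop iteration, for every chunk size 1 ≤ j+1 ≤ n
theorem pvBody_eval (s : List Int) (j : Nat) (hn : 0 < s.length) (hj : j < s.length) :
    pvBody s (s.length : Int) none (j : Int) =
      (if s.length = 2 * (j + 1) ∧ s.take (j + 1) = s.drop (j + 1) then some (s.take (j + 1))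
       else if s.length ≤ j + 1 then some s else none) := by
  have hcs : ((j : Int) + 1) = ((j + 1 : Nat) : Int) := by push_cast; ring
  set c : Nat := j + 1 with hc
  have hcpos : (0:Int) < (c : Int) := by omega
  by_cases h1 : s.length ≤ c
  · -- one chunk: the whole list; the reduce returns it, truthy since s ≠ []
    rw [if_neg (by rintro ⟨h, -⟩; omega), if_pos h1]
    have hrange : PySem.List.pyRange 0 (s.length : Int) (c : Int) = [0] := by
      rw [pyRange_pos_cons _ _ _ hcpos (by omega), zero_add,
          PySem.List.pyRange_of_pos _ _ hcpos, if_neg (by omega)]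
      simp
    have e0 : PySem.List.slice s (some 0) (some ((c : Int))) = s := by
      rw [PySem.List.slice_toNat s le_rfl (by omega)]
      simp only [Int.toNat_zero, Nat.sub_zero, Int.toNat_natCast, List.drop_zero]
      exact List.take_of_length_le h1
    have hchunk : pvChunks s (s.length : Int) (c : Int) = [s] := by
      unfold pvChunks
      rw [hrange]
      simp only [List.map_cons, List.map_nil, zero_add]
      rw [e0]
    have hne : s.isEmpty = false := by
      cases s with | nil => simp at hn | cons a t => rfl
    simp only [pvBody, hcs, hchunk, pvReduceEq, List.foldl_nil, pvTruthy, hne]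
    rfl
  · have h1' : c < s.length := by omega
    by_cases h2 : s.length ≤ 2 * c
    · -- two chunks: the two halves (second possibly shorter)
      have hrange : PySem.List.pyRange 0 (s.length : Int) (c : Int) = [0, (c : Int)] := by
        rw [pyRange_pos_cons _ _ _ hcpos (by omega), zero_add,
            pyRange_pos_cons _ _ _ hcpos (by omega),
            PySem.List.pyRange_of_pos _ _ hcpos, if_neg (by omega)]
        simp
      have e0 : PySem.List.slice s (some 0) (some ((c : Int))) = s.take c := by
        rw [PySem.List.slice_toNat s le_rfl (by omega)]
        simp only [Int.toNat_zero, Nat.sub_zero, Int.toNat_natCast, List.drop_zero]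
      have e1 : PySem.List.slice s (some (c : Int)) (some ((c : Int) + (c : Int))) = s.drop c := by
        rw [PySem.List.slice_toNat s (by omega) (by omega)]
        simp only [Int.toNat_natCast]
        rw [show ((c : Int) + (c : Int)).toNat - c = c by omega]
        exact List.take_of_length_le (by rw [List.length_drop]; omega)
      have hchunk : pvChunks s (s.length : Int) (c : Int) = [s.take c, s.drop c] := by
        unfold pvChunks
        rw [hrange]
        simp only [List.map_cons, List.map_nil, zero_add]
        rw [e0, e1]
      simp only [pvBody, hcs, hchunk, pvReduceEq, List.foldl_cons, List.foldl_nil, pvEqStep,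
        pvTruthy]
      by_cases heq : s.take c = s.drop c
      · have hlen : s.length = 2 * c := by
          have := congrArg List.length heq
          rw [List.length_take, List.length_drop] at this
          omega
        rw [if_pos (show decide (s.take c = s.drop c) = true by simp [heq]),
            if_pos ⟨hlen, heq⟩]
        rfl
      · rw [if_neg (show ¬ decide (s.take c = s.drop c) = true by simp [heq]),
            if_neg (fun hb : s.length = 2 * c ∧ s.take c = s.drop c => heq hb.2),
            if_neg (by omega : ¬ s.length ≤ c)]
    · -- three or more chunks: the bool == list comparisons make the reduce falsy
      have h2' : 2 * c < s.length := by omega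
      have hrange : PySem.List.pyRange 0 (s.length : Int) (c : Int) =
          0 :: (c : Int) :: ((c : Int) + (c : Int)) ::
            PySem.List.pyRange ((c : Int) + (c : Int) + (c : Int)) (s.length : Int) (c : Int) := by
        rw [pyRange_pos_cons _ _ _ hcpos (by omega), zero_add,
            pyRange_pos_cons _ _ _ hcpos (by omega),
            pyRange_pos_cons _ _ _ hcpos (by omega)]
      rw [if_neg (by rintro ⟨h, -⟩; omega), if_neg (by omega)]
      simp only [pvBody, hcs]
      unfold pvChunks
      rw [hrange]
      simp only [List.map_cons, pvReduceEq, List.foldl_cons, pvEqStep]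
      rw [foldl_pvEqStep_false]
      simp [pvTruthy]

-- findSome? of the body over an all-`none` list of indices
theorem findSome?_body_none (s : List Int) (l : List Nat)
    (h : ∀ j ∈ l, pvBody s (s.length : Int) none (j : Int) = none) :
    l.findSome? (fun j : Nat => pvBody s (s.length : Int) none (j : Int)) = none := by
  rw [List.findSome?_eq_none_iff]
  intro j hj; exact h j hj

-- A in closed form
theorem a_eq (s : List Int) :
    reduce_repetitive_siteswaps s =
      if s.length % 2 = 0 ∧ s.take (s.length / 2) = s.drop (s.length / 2)
      then s.take (s.length / 2) else s := by
  show (((PySem.List.pyRange 0 (s.length : Int) 1).foldl (pvBody s (s.length : Int)) none).getD s)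
      = _
  rcases Nat.eq_zero_or_pos s.length with hn | hn
  · have hs : s = [] := List.length_eq_zero_iff.mp hn
    subst hs
    decide
  · rw [foldl_pvBody_eq_findSome, PySem.List.pyRange_one, List.findSome?_map]
    rw [show ((fun cs0 => pvBody s (s.length : Int) none cs0) ∘ fun k : Nat => (0:Int) + (k:Int))
        = fun j : Nat => pvBody s (s.length : Int) none (j : Int) by
      funext j; simp [Function.comp]]
    rw [show (((s.length : Int)) - 0).toNat = s.length by omega]
    by_cases hrep : s.length % 2 = 0 ∧ s.take (s.length / 2) = s.drop (s.length / 2)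
    · obtain ⟨hpar, heq⟩ := hrep
      rw [if_pos ⟨hpar, heq⟩]
      obtain ⟨m, hm⟩ : ∃ m, s.length / 2 = m + 1 := ⟨s.length / 2 - 1, by omega⟩
      have hsplit : List.range s.length = (List.range m ++ [m]) ++
          List.map (fun x => (m + 1) + x) (List.range (s.length - (m + 1))) := by
        conv_lhs => rw [show s.length = (m + 1) + (s.length - (m + 1)) by omega]
        rw [List.range_add, List.range_succ]
      rw [hsplit, List.findSome?_append, List.findSome?_append]
      rw [findSome?_body_none s (List.range m) (by
        intro j hj
        have hj' : j < m := List.mem_range.mp hj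
        rw [pvBody_eval s j hn (by omega)]
        rw [if_neg (by rintro ⟨h1, -⟩; omega), if_neg (by omega)])]
      rw [Option.none_or, List.findSome?_cons]
      have hhit : pvBody s (s.length : Int) none ((m : Nat) : Int) = some (s.take (s.length / 2)) := by
        rw [pvBody_eval s m hn (by omega), ← hm]
        rw [if_pos ⟨by omega, heq⟩]
      rw [hhit]
      rfl
    · rw [if_neg hrep]
      obtain ⟨m, hm⟩ : ∃ m, s.length = m + 1 := ⟨s.length - 1, by omega⟩
      have hsplit : List.range s.length = List.range m ++ [m] := by
        conv_lhs => rw [hm]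
        rw [List.range_succ]
      rw [hsplit, List.findSome?_append]
      rw [findSome?_body_none s (List.range m) (by
        intro j hj
        have hj' : j < m := List.mem_range.mp hj
        rw [pvBody_eval s j hn (by omega)]
        rw [if_neg ?_, if_neg (by omega)]
        rintro ⟨hl, he⟩
        exact hrep ⟨by omega, by rw [show s.length / 2 = j + 1 by omega]; exact he⟩)]
      rw [Option.none_or, List.findSome?_cons]
      have hhit : pvBody s (s.length : Int) none ((m : Nat) : Int) = some s := by
        rw [pvBody_eval s m hn (by omega)]
        rw [if_neg (by rintro ⟨hl, -⟩; omega), if_pos (by omega)]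
      rw [hhit]
      rfl

-- ===== VERDICT (by name: the statement is the Claim_ definition above) =====
theorem reduce_repetitive_siteswaps_spec : Claim_equal_reduce_repetitive_siteswaps := by
  intro s _
  unfold Spec_reduce_repetitive_siteswaps
  rw [a_eq, alt_eq]
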